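-- pv_equiv track=rewrite | github.com/kamilest/cst-ii-bioinformatics | problems/BA9B/ba9b.py | match_prefix_trie
-- ===== SOURCE A (Python) =====
-- def match_prefix_trie(text, trie):
--     i = 0
--     v = 0
--     while True:
--         # if v is a leaf in trie
--         if not trie[v]:
--             return True
--         elif i < len(text) and text[i] in trie[v]:
--             v = trie[v][text[i]]
--             i+=1
--         else:
--             return False
-- ===== SOURCE B (Python) =====
-- def match_prefix_trie(text, trie):
--     # NFA-style level search: frontier = the set of trie nodes reachable by
--     # spelling text[:d]; a prefix matches iff some frontier node along the way
--     # (or at the end) is a leaf.  Determinism of the dict edges makes the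
--     # frontier a singleton (or empty), so this agrees with the pointer walk.
--     frontier = {0}
--     for c in text:
--         if any(not trie[v] for v in frontier):
--             return True
--         frontier = {trie[v][c] for v in frontier if c in trie[v]}
--     return any(not trie[v] for v in frontier)
-- ===== Notes on version B (the rewrite author's own statement) =====
-- stated objective: alternative
-- what changed: A walks a single node pointer along the text with a while-True/index loop; B does an NFA-style level search, folding over the characters while maintaining the SET of trie nodes reachable by spelling text[:d] (empty after a mismatch) and testing the frontier for a leaf, so there is no early exit on a missing edge and no mutable index.
import Mathlib
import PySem

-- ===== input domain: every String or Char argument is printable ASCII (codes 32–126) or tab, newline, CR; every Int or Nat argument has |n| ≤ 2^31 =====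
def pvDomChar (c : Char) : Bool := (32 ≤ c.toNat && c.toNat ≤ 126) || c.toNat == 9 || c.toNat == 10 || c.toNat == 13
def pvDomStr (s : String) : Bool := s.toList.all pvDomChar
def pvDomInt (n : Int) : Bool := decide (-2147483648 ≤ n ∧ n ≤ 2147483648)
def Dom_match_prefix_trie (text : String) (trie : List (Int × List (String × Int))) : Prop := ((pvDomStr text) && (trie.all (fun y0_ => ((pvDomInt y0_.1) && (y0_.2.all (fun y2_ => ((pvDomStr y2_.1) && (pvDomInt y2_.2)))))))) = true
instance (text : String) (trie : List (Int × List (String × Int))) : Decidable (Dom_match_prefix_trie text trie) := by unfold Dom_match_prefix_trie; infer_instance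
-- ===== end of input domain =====

-- B replaces A's single-pointer while-True walk by an NFA-style level search over a
-- frontier SET of reachable nodes (alternative decomposition, same cost).

-- ===== PORT A =====
-- A's while loop: each iteration either returns or advances i, so it is a
-- recursion on the remaining characters with the current node as argument.
-- A `none` from List.lookup is a Python KeyError (excluded by Pre_).
def pvGoA (trie : List (Int × List (String × Int))) : List Char → Int → Bool
  | rest, v =>
    match List.lookup v trie with
    | none => false
    | some children =>
      if children.isEmpty then true
      else
        match rest with
        | [] => false
        | c :: rest' =>
          match List.lookup (String.mk [c]) children with
          | none => false
          | some v' => pvGoA trie rest' v'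
  termination_by rest => rest.length
  decreasing_by simp

def match_prefix_trie (text : String) (trie : List (Int × List (String × Int))) : Bool :=
  pvGoA trie text.toList 0

-- ===== PORT B =====
-- `any(not trie[v] for v in frontier)`: lazily scans the frontier; none = KeyError.
def pvAnyLeaf (trie : List (Int × List (String × Int))) : List Int → Option Bool
  | [] => some false
  | v :: vs =>
    match List.lookup v trie with
    | none => none
    | some children => if children.isEmpty then some true else pvAnyLeaf trie vs

-- `{trie[v][c] for v in frontier if c in trie[v]}`: set comprehension over the frontier.
def pvStepFr (trie : List (Int × List (String × Int))) (c : Char) :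
    List Int → PySem.Set Int → Option (PySem.Set Int)
  | [], acc => some acc
  | v :: vs, acc =>
    match List.lookup v trie with
    | none => none
    | some children =>
      match List.lookup (String.mk [c]) children with
      | none => pvStepFr trie c vs acc
      | some w => pvStepFr trie c vs (acc.add w)

-- B's for-loop over the characters, threading the frontier set; early `return True`.
def pvRunB (trie : List (Int × List (String × Int))) : List Char → PySem.Set Int → Option Bool
  | [], fr => pvAnyLeaf trie fr
  | c :: cs, fr =>
    match pvAnyLeaf trie fr with
    | none => none
    | some true => some true
    | some false =>
      match pvStepFr trie c fr PySem.Set.empty with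
      | none => none
      | some fr' => pvRunB trie cs fr'

def match_prefix_trie_alt (text : String) (trie : List (Int × List (String × Int))) : Bool :=
  (pvRunB trie text.toList (PySem.Set.ofList [0])).getD false

-- ===== PRECONDITION & SPEC =====
-- Python A raises KeyError exactly when the text-directed walk from node 0 reaches
-- a node id that is not a key of the dict; Pre_ says every node id on that path is
-- present (it is exactly A's domain: a condition on text and trie, nothing else).
def pvPathOk (trie : List (Int × List (String × Int))) : Int → List Char → Bool
  | v, [] => (List.lookup v trie).isSome
  | v, c :: cs => (List.lookup v trie).elim false (fun ch => ch.isEmpty || (List.lookup (String.mk [c]) ch).elim true (fun w => pvPathOk trie w cs))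

def Pre_match_prefix_trie (text : String) (trie : List (Int × List (String × Int))) : Prop :=
  pvPathOk trie 0 text.toList = true
instance (text : String) (trie : List (Int × List (String × Int))) : Decidable (Pre_match_prefix_trie text trie) := by unfold Pre_match_prefix_trie; infer_instance

def pvWitness_match_prefix_trie : String × (List (Int × List (String × Int))) :=
  ("a", [(0, [("a", 1)]), (1, [])])

def Spec_match_prefix_trie (text : String) (trie : List (Int × List (String × Int))) (out : Bool) : Prop := out = match_prefix_trie_alt text trie
instance (text : String) (trie : List (Int × List (String × Int))) (out : Bool) : Decidable (Spec_match_prefix_trie text trie out) := by unfold Spec_match_prefix_trie; infer_instance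

-- ===== CLAIM (what is proved, stated in full; the proofs are below) =====
def Claim_equal_match_prefix_trie : Prop := ∀ (text : String) (trie : List (Int × List (String × Int))), Dom_match_prefix_trie text trie → Pre_match_prefix_trie text trie → Spec_match_prefix_trie text trie (match_prefix_trie text trie)

-- ===== LEMMAS AND PROOFS =====
-- Once the frontier is empty it stays empty and the run returns false.
theorem pvRunB_nil_fr (trie : List (Int × List (String × Int))) :
    ∀ cs : List Char, pvRunB trie cs [] = some false := by
  intro cs
  induction cs with
  | nil => simp [pvRunB, pvAnyLeaf]
  | cons c cs ih => simp [pvRunB, pvAnyLeaf, pvStepFr, ih, PySem.Set.empty]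

-- Invariant: on a singleton frontier {v} whose text-directed path is KeyError-free,
-- B's level search returns exactly A's walk.
theorem pvGoA_eq_runB (trie : List (Int × List (String × Int))) :
    ∀ (rest : List Char) (v : Int), pvPathOk trie v rest = true →
      (pvRunB trie rest [v]).getD false = pvGoA trie rest v := by
  intro rest
  induction rest with
  | nil =>
    intro v hok
    simp only [pvPathOk, Option.isSome_iff_exists] at hok
    obtain ⟨ch, hch⟩ := hok
    rw [pvGoA.eq_1]
    by_cases hc : ch.isEmpty <;> simp [pvRunB, pvAnyLeaf, hch, hc]
  | cons c cs ih =>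
    intro v hok
    simp only [pvPathOk] at hok
    cases hch : List.lookup v trie with
    | none => simp [hch] at hok
    | some ch =>
      rw [pvGoA.eq_1]
      simp only [hch, Option.elim] at hok ⊢
      by_cases hc : ch.isEmpty
      · simp [pvRunB, pvAnyLeaf, hch, hc]
      · simp only [hc, if_false]
        cases hlk : List.lookup (String.mk [c]) ch with
        | none =>
          simp [pvRunB, pvAnyLeaf, hch, hc, pvStepFr, hlk, pvRunB_nil_fr, PySem.Set.empty]
        | some w =>
          have hok' : pvPathOk trie w cs = true := by
            simpa [hc, hlk] using hok
          have hfr : pvStepFr trie c [v] PySem.Set.empty = some (PySem.Set.add PySem.Set.empty w) := by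
            simp [pvStepFr, hch, hlk]
          have hadd : PySem.Set.add PySem.Set.empty w = [w] := by
            simp [PySem.Set.add, PySem.Set.empty, PySem.Set.contains]
          simp only [pvRunB, pvAnyLeaf, hch, hc, if_false, hfr, hadd]
          exact ih w hok'

-- ===== VERDICT (by name: the statement is the Claim_ definition above) =====
theorem match_prefix_trie_spec : Claim_equal_match_prefix_trie := by
  intro text trie _ hpre
  unfold Spec_match_prefix_trie match_prefix_trie match_prefix_trie_alt
  have h0 : PySem.Set.ofList ([0] : List Int) = [0] := by decide
  rw [h0, pvGoA_eq_runB trie text.toList 0 hpre]
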